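-- pv_equiv track=rewrite | github.com/duyhung2h/AoE2ScenarioParser | api_docs/fileobject.py | _fix_docstring
-- ===== SOURCE A (Python) =====
-- from typing import Dict
--
-- def _fix_docstring(function: Dict):
--     docstr: str = function.get('docstr')
--     look_for = ['Args:', 'Arguments:', 'Returns:', ':Author:']
--
--     if docstr is not None:
--         locations = [docstr.find(string) for string in look_for if docstr.find(string) != -1]
--         if locations:
--             end_of_desc = min(locations)
--             docstr = docstr[:end_of_desc]
--
--         return '\n'.join(line.strip() for line in docstr.splitlines())
--     return ""
-- ===== SOURCE B (Python) =====
-- def _fix_docstring(function):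
--     docstr = function.get('docstr')
--     if docstr is None:
--         return ""
--     markers = ('Args:', 'Arguments:', 'Returns:', ':Author:')
--     for i in range(len(docstr)):
--         if docstr.startswith(markers, i):
--             docstr = docstr[:i]
--             break
--     return '\n'.join(line.strip() for line in docstr.splitlines())
-- ===== Notes on version B (the rewrite author's own statement) =====
-- stated objective: idiomatic
-- what changed: A runs four separate str.find scans, filters out the misses and takes min; B makes one left-to-right pass with str.startswith(markers, i), cutting at the first position where any marker begins.
import Mathlib
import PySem

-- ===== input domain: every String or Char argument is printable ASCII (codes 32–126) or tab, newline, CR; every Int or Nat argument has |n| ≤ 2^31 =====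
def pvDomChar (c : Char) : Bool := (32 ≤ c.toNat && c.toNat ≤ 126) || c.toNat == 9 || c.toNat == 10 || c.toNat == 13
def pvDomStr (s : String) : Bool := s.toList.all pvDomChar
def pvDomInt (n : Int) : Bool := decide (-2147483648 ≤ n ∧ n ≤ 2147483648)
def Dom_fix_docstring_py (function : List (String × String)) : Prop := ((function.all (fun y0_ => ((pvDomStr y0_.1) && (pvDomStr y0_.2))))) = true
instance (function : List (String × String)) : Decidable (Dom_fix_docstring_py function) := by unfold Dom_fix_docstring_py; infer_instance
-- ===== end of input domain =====

-- B replaces the four separate find scans plus min with ONE left-to-right scan that stops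
-- at the first position where any marker starts (objective: idiomatic single pass).

-- ===== PORT A =====
-- literal port of A: four finds, keep the ones ≠ -1, cut at their minimum, then strip lines
def fix_docstring_py (function : List (String × String)) : String :=
  match (PySem.Dict.ofList function).get? "docstr" with
  | none => ""                                   -- docstr is None
  | some docstr =>
    let look_for : List String := ["Args:", "Arguments:", "Returns:", ":Author:"]
    -- [docstr.find(s) for s in look_for if docstr.find(s) != -1]
    let locations : List Int :=
      (look_for.filter (fun s => PySem.Str.find docstr s ≠ -1)).map
        (fun s => PySem.Str.find docstr s)
    -- 'if locations: docstr = docstr[:min(locations)]'  (min? = none ↔ locations = [])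
    let docstr2 : String :=
      match PySem.List.min? locations (fun x => x) with
      | some end_of_desc => PySem.Str.slice docstr none (some end_of_desc)
      | none => docstr
    PySem.Str.join "\n" ((PySem.Str.splitlines docstr2).map PySem.Str.strip)

-- ===== PORT B =====
-- B's loop 'for i in range(len(docstr)): if docstr.startswith(markers, i): cut': emit
-- characters until some marker is a prefix of the remaining suffix, then stop.
def pvCut (markers : List (List Char)) : List Char → List Char
  | [] => []
  | c :: rest =>
    if markers.any (fun m => PySem.Chars.startswith (c :: rest) m) then []
    else c :: pvCut markers rest

def fix_docstring_py_alt (function : List (String × String)) : String :=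
  match (PySem.Dict.ofList function).get? "docstr" with
  | none => ""
  | some docstr =>
    let markers : List (List Char) :=
      ["Args:".toList, "Arguments:".toList, "Returns:".toList, ":Author:".toList]
    let docstr2 : String := String.ofList (pvCut markers docstr.toList)
    PySem.Str.join "\n" ((PySem.Str.splitlines docstr2).map PySem.Str.strip)

-- ===== PRECONDITION & SPEC =====
def Spec_fix_docstring_py (function : List (String × String)) (out : String) : Prop := out = fix_docstring_py_alt function
instance (function : List (String × String)) (out : String) : Decidable (Spec_fix_docstring_py function out) := by unfold Spec_fix_docstring_py; infer_instance

-- ===== CLAIM (what is proved, stated in full; the proofs are below) =====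
def Claim_equal_fix_docstring_py : Prop := ∀ (function : List (String × String)), Dom_fix_docstring_py function → Spec_fix_docstring_py function (fix_docstring_py function)

-- ===== LEMMAS AND PROOFS =====

-- if no marker occurs anywhere in cs, pvCut copies cs unchanged
lemma pvCut_eq_self (L : List (List Char)) (cs : List Char)
    (h : ∀ m ∈ L, ¬ m <:+: cs) : pvCut L cs = cs := by
  induction cs with
  | nil => rfl
  | cons c rest ih =>
    have hany : (L.any (fun m => PySem.Chars.startswith (c :: rest) m)) = false := by
      rw [List.any_eq_false]
      intro m hm
      simp only [PySem.Chars.startswith_iff]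
      exact fun hp => h m hm hp.isInfix
    rw [pvCut, hany, if_neg (by simp)]
    exact congrArg (c :: ·) (ih (fun m hm hi => h m hm (hi.trans (List.suffix_cons c rest).isInfix)))

-- if n is the least index at which some marker of L starts, pvCut cs = cs.take n
lemma pvCut_eq_take (L : List (List Char)) (cs : List Char) (n : Nat)
    (hmatch : ∃ m ∈ L, m <+: cs.drop n)
    (hmin : ∀ i < n, ∀ m ∈ L, ¬ m <+: cs.drop i) : pvCut L cs = cs.take n := by
  induction cs generalizing n with
  | nil => simp [pvCut]
  | cons c rest ih =>
    cases n with
    | zero =>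
      obtain ⟨m, hm, hp⟩ := hmatch
      have hany : (L.any (fun m => PySem.Chars.startswith (c :: rest) m)) = true := by
        rw [List.any_eq_true]
        exact ⟨m, hm, by rw [PySem.Chars.startswith_iff]; exact hp⟩
      rw [pvCut, hany, if_pos rfl]; rfl
    | succ n' =>
      have hany : (L.any (fun m => PySem.Chars.startswith (c :: rest) m)) = false := by
        rw [List.any_eq_false]
        intro m hm
        simp only [PySem.Chars.startswith_iff]
        simpa using hmin 0 (Nat.succ_pos n') m hm
      rw [pvCut, hany, if_neg (by simp), List.take_succ_cons]
      refine congrArg (c :: ·) (ih n' ?_ ?_)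
      · simpa using hmatch
      · intro i hi m hm
        simpa using hmin (i + 1) (Nat.succ_lt_succ hi) m hm

-- A's find-the-markers-and-cut-at-their-minimum equals B's single scan, for any markers
lemma cut_agree (ms : List String) (docstr : String) :
    (match PySem.List.min?
        ((ms.filter (fun s => PySem.Str.find docstr s ≠ -1)).map
          (fun s => PySem.Str.find docstr s)) (fun x => x) with
     | some v => PySem.Str.slice docstr none (some v)
     | none => docstr) = String.ofList (pvCut (ms.map String.toList) docstr.toList) := by
  cases hmin : PySem.List.min?
      ((ms.filter (fun s => PySem.Str.find docstr s ≠ -1)).map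
        (fun s => PySem.Str.find docstr s)) (fun x => x) with
  | none =>
    simp only [PySem.List.min?_eq_none_iff, List.map_eq_nil_iff, List.filter_eq_nil_iff] at hmin
    have hno : ∀ m ∈ ms.map String.toList, ¬ m <:+: docstr.toList := by
      intro m hm
      obtain ⟨s, hs, rfl⟩ := List.mem_map.mp hm
      have hfind : PySem.Chars.find docstr.toList s.toList = -1 := by
        have := hmin s hs
        simpa using this
      exact (PySem.Chars.find_eq_neg_one_iff docstr.toList s.toList).mp hfind
    simp only []
    rw [pvCut_eq_self _ docstr.toList hno]
    simp
  | some v =>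
    have hvmem := PySem.List.min?_mem hmin
    obtain ⟨s0, hs0f, hv⟩ := List.mem_map.mp hvmem
    have hs0 : s0 ∈ ms := (List.mem_filter.mp hs0f).1
    have hs0ne : PySem.Chars.find docstr.toList s0.toList ≠ -1 := by
      have := (List.mem_filter.mp hs0f).2
      simpa using this
    rw [PySem.Str.find_eq] at hv
    have hinf : s0.toList <:+: docstr.toList :=
      (PySem.Chars.find_ne_neg_one_iff docstr.toList s0.toList).mp hs0ne
    have hv0 : 0 ≤ v := hv ▸ (PySem.Chars.find_nonneg_iff docstr.toList s0.toList).mpr hinf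
    have hspec := PySem.Chars.find_spec (s := docstr.toList) (sub := s0.toList) (hv ▸ hv0)
    have hmatch : ∃ m ∈ ms.map String.toList, m <+: docstr.toList.drop v.toNat :=
      ⟨s0.toList, List.mem_map_of_mem hs0, hv ▸ hspec.1⟩
    have hminle : ∀ i < v.toNat, ∀ m ∈ ms.map String.toList, ¬ m <+: docstr.toList.drop i := by
      intro i hi m hm hp
      obtain ⟨s, hs, rfl⟩ := List.mem_map.mp hm
      have hinf' : s.toList <:+: docstr.toList :=
        hp.isInfix.trans (List.drop_suffix i docstr.toList).isInfix
      have hne' : PySem.Chars.find docstr.toList s.toList ≠ -1 :=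
        (PySem.Chars.find_ne_neg_one_iff docstr.toList s.toList).mpr hinf'
      have hf0 : 0 ≤ PySem.Chars.find docstr.toList s.toList :=
        (PySem.Chars.find_nonneg_iff docstr.toList s.toList).mpr hinf'
      have hvle : v ≤ PySem.Chars.find docstr.toList s.toList := by
        have := PySem.List.min?_isMin hmin (PySem.Str.find docstr s)
          (List.mem_map_of_mem (List.mem_filter.mpr ⟨hs, by simpa using hne'⟩))
        simpa using this
      have hfle : (PySem.Chars.find docstr.toList s.toList).toNat ≤ i := by
        by_contra hlt
        exact ((PySem.Chars.find_spec (s := docstr.toList) (sub := s.toList) hf0).2 i (by omega)) hp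
      omega
    simp only []
    apply String.toList_inj.mp
    have hslice : (PySem.Str.slice docstr none (some v)).toList
        = PySem.List.slice docstr.toList none (some v) := by simp
    rw [hslice, PySem.List.slice_to (xs := docstr.toList) (b := v) hv0,
      pvCut_eq_take _ docstr.toList v.toNat hmatch hminle]
    simp

-- ===== VERDICT (by name: the statement is the Claim_ definition above) =====
theorem fix_docstring_py_spec : Claim_equal_fix_docstring_py := by
  intro function _
  unfold Spec_fix_docstring_py fix_docstring_py fix_docstring_py_alt
  cases hget : (PySem.Dict.ofList function).get? "docstr" with
  | none => rfl
  | some docstr =>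
    refine congrArg (fun s => PySem.Str.join "\n" ((PySem.Str.splitlines s).map PySem.Str.strip)) ?_
    have h := cut_agree ["Args:", "Arguments:", "Returns:", ":Author:"] docstr
    simpa using h
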